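-- pv_equiv track=rewrite | github.com/IshaKhan06/Build-Personal-AI-Employee | tools/ralph_loop_runner.py | _build_workflow
-- ===== SOURCE A (Python) =====
-- from typing import List, Dict, Any, Optional
--
-- def _build_workflow(task_type: str, metadata: Dict) -> List[str]:
--     """Build workflow stages for task type"""
--     # Default workflow for social media leads
--     if any(lead in task_type for lead in ['lead', 'social']):
--         return [
--             'analysis',
--             'skill_execution',  # Generate draft
--             'hitl_approval',    # Wait for approval
--             'mcp_execution',    # Execute via MCP
--             'audit_logging',
--             'completion'
--         ]
--
--     # Financial tasks
--     if 'financial' in task_type: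
--         return ['analysis', 'skill_execution', 'completion']
--
--     # Schedule tasks
--     if 'schedule' in task_type:
--         return ['analysis', 'mcp_execution', 'completion']
--
--     # Default
--     return ['analysis', 'completion']
-- ===== SOURCE B (Python) =====
-- from typing import List, Dict
--
-- # Canonical ordered pipeline; each stage is selected by a predicate over
-- # feature flags, instead of dispatching to one of several whole lists.
-- def _build_workflow(task_type: str, metadata: Dict) -> List[str]:
--     """Build workflow stages by filtering the canonical pipeline."""
--     lead = any(k in task_type for k in ('lead', 'social'))
--     fin = 'financial' in task_type
--     sched = 'schedule' in task_type
--     stages = [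
--         ('analysis', True),
--         ('skill_execution', lead or fin),
--         ('hitl_approval', lead),
--         ('mcp_execution', lead or (sched and not fin)),
--         ('audit_logging', lead),
--         ('completion', True),
--     ]
--     return [stage for stage, wanted in stages if wanted]
-- ===== Notes on version B (the rewrite author's own statement) =====
-- stated objective: alternative
-- what changed: B computes three boolean feature flags and builds the result by filtering one canonical six-stage pipeline with per-stage inclusion predicates, instead of A's first-match dispatch that returns one of four whole hard-coded lists.
import Mathlib
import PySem

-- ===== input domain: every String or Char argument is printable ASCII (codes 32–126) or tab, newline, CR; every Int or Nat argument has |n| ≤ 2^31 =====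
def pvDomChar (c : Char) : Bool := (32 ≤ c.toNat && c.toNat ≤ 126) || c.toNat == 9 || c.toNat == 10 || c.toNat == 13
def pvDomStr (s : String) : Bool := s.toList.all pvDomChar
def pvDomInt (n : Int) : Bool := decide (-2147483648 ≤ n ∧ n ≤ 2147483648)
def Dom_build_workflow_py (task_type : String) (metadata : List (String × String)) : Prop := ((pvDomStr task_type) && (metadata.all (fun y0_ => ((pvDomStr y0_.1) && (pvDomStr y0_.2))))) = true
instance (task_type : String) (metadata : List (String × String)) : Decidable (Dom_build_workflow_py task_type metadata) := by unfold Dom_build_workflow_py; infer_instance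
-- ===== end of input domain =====

-- B builds the result by filtering one canonical pipeline with per-stage boolean predicates instead of A's first-match dispatch among whole hard-coded lists (alternative, same cost).


-- ===== PORT A =====
def build_workflow_py (task_type : String) (metadata : List (String × String)) : List String :=
  if (["lead", "social"].any (fun lead => PySem.Str.isIn lead task_type)) then
    ["analysis", "skill_execution", "hitl_approval", "mcp_execution", "audit_logging", "completion"]
  else if PySem.Str.isIn "financial" task_type then
    ["analysis", "skill_execution", "completion"]
  else if PySem.Str.isIn "schedule" task_type then
    ["analysis", "mcp_execution", "completion"]
  else
    ["analysis", "completion"]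

-- ===== PORT B =====
def build_workflow_py_alt (task_type : String) (metadata : List (String × String)) : List String :=
  let lead := ["lead", "social"].any (fun k => PySem.Str.isIn k task_type)
  let fin := PySem.Str.isIn "financial" task_type
  let sched := PySem.Str.isIn "schedule" task_type
  let stages : List (String × Bool) :=
    [ ("analysis", true),
      ("skill_execution", lead || fin),
      ("hitl_approval", lead),
      ("mcp_execution", lead || (sched && !fin)),
      ("audit_logging", lead),
      ("completion", true) ]
  (stages.filter (fun p => p.2)).map (fun p => p.1)

-- ===== PRECONDITION & SPEC =====
def Spec_build_workflow_py (task_type : String) (metadata : List (String × String)) (out : List String) : Prop := out = build_workflow_py_alt task_type metadata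
instance (task_type : String) (metadata : List (String × String)) (out : List String) : Decidable (Spec_build_workflow_py task_type metadata out) := by unfold Spec_build_workflow_py; infer_instance

-- ===== CLAIM =====
def Claim_equal_build_workflow_py : Prop := ∀ (task_type : String) (metadata : List (String × String)), Dom_build_workflow_py task_type metadata → Spec_build_workflow_py task_type metadata (build_workflow_py task_type metadata)

-- ===== LEMMAS AND PROOFS =====

-- ===== VERDICT =====
theorem build_workflow_py_spec : Claim_equal_build_workflow_py := by
  intro task_type metadata _
  unfold Spec_build_workflow_py build_workflow_py build_workflow_py_alt
  obtain h1 | h1 := (PySem.Chars.isIn ['l','e','a','d'] task_type.toList).eq_false_or_eq_true <;>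
  obtain h2 | h2 := (PySem.Chars.isIn ['s','o','c','i','a','l'] task_type.toList).eq_false_or_eq_true <;>
  obtain h3 | h3 := (PySem.Chars.isIn ['f','i','n','a','n','c','i','a','l'] task_type.toList).eq_false_or_eq_true <;>
  obtain h4 | h4 := (PySem.Chars.isIn ['s','c','h','e','d','u','l','e'] task_type.toList).eq_false_or_eq_true <;>
  simp [PySem.Str.isIn, h1, h2, h3, h4]
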